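-- pv_equiv track=rewrite | github.com/unhelkarlab/hierarchical-reward-design-from-language | Eureka/eureka/utils/check_eureka_code.py | extract_eureka_code
-- ===== SOURCE A (Python) =====
-- def extract_eureka_code(code_string):
--   lines = code_string.split("\n")
--   in_function = False
--   func_indent = None
--   func_lines = []
--
--   for line in lines:
--     stripped = line.lstrip()
--     indent = len(line) - len(stripped)
--
--     if not in_function:
--       if stripped.startswith("def "):
--         in_function = True
--         func_indent = indent
--         func_lines.append(stripped)
--     else:
--       # End of function if we hit a line with less indentation
--       if stripped and indent <= func_indent:
--         break
--       func_lines.append(line)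
--
--   return "\n".join(func_lines)
-- ===== SOURCE B (Python) =====
-- def extract_eureka_code(code_string):
--   lines = code_string.split("\n")
--   start = next((i for i, l in enumerate(lines) if l.lstrip().startswith("def ")), None)
--   if start is None:
--     return ""
--   first = lines[start].lstrip()
--   func_indent = len(lines[start]) - len(first)
--   end = next((j for j in range(start + 1, len(lines))
--               if lines[j].lstrip() and len(lines[j]) - len(lines[j].lstrip()) <= func_indent),
--              len(lines))
--   return "\n".join([first] + lines[start + 1:end])
-- ===== Notes on version B (the rewrite author's own statement) =====
-- stated objective: simpler
-- what changed: Replaces A's boolean state-machine accumulation loop with explicit boundary indices: find the first 'def ' line, find the first terminating line after it, slice the lines and join.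
import Mathlib
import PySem

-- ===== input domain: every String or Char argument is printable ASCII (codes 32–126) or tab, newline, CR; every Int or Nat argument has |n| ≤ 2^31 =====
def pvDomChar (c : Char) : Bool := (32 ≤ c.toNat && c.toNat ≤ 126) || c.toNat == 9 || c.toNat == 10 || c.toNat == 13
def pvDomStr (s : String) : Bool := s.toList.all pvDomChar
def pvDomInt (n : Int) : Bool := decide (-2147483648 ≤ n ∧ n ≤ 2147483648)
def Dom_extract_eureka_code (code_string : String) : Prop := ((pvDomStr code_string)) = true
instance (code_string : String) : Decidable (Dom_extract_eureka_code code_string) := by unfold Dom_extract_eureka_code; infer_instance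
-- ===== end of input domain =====

-- B finds the start index (first 'def ' line) and the end index (first non-empty line
-- at indent ≤ func_indent after it) and slices, instead of A's boolean state machine;
-- objective: simpler (explicit boundary indices + slice).

-- ===== PORT A =====
-- A's scan loop: state (in_function, func_indent, func_lines); 'break' = return acc.
def pvGoA : List String → Bool → Int → List String → List String
  | [], _, _, acc => acc
  | line :: rest, inf, fi, acc =>
    let stripped := PySem.Str.lstrip line
    let indent := PySem.Str.len line - PySem.Str.len stripped
    if inf = false then
      if PySem.Str.startswith stripped "def " then
        pvGoA rest true indent (acc ++ [stripped])
      else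
        pvGoA rest false fi acc
    else
      if stripped ≠ "" ∧ indent ≤ fi then acc
      else pvGoA rest true fi (acc ++ [line])

def extract_eureka_code (code_string : String) : String :=
  PySem.Str.join "\n" (pvGoA ((PySem.Str.split? code_string "\n").getD []) false 0 [])

-- ===== PORT B =====
def pvDefP (l : String) : Bool := PySem.Str.startswith (PySem.Str.lstrip l) "def "
def pvStopP (fi : Int) (l : String) : Bool :=
  PySem.Str.lstrip l ≠ "" && PySem.Str.len l - PySem.Str.len (PySem.Str.lstrip l) ≤ fi

def extract_eureka_code_alt (code_string : String) : String :=
  let lines := (PySem.Str.split? code_string "\n").getD []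
  match lines.findIdx? pvDefP with
  | none => ""
  | some start =>
    let first := PySem.Str.lstrip (lines.getD start "")
    let fi := PySem.Str.len (lines.getD start "") - PySem.Str.len first
    let rest := lines.drop (start + 1)
    let endCnt := (rest.findIdx? (pvStopP fi)).getD rest.length
    PySem.Str.join "\n" (first :: rest.take endCnt)

-- ===== PRECONDITION & SPEC =====
def Spec_extract_eureka_code (code_string : String) (out : String) : Prop := out = extract_eureka_code_alt code_string
instance (code_string : String) (out : String) : Decidable (Spec_extract_eureka_code code_string out) := by unfold Spec_extract_eureka_code; infer_instance

-- ===== CLAIM (what is proved, stated in full; the proofs are below) =====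
def Claim_equal_extract_eureka_code : Prop := ∀ (code_string : String), Dom_extract_eureka_code code_string → Spec_extract_eureka_code code_string (extract_eureka_code code_string)

-- ===== LEMMAS AND PROOFS =====

-- Phase 2: once inside the function, A collects exactly the lines before the first stop line.
theorem pvGoA_true (lines : List String) : ∀ (fi : Int) (acc : List String),
    pvGoA lines true fi acc = acc ++ lines.take ((lines.findIdx? (pvStopP fi)).getD lines.length) := by
  induction lines with
  | nil => intro fi acc; simp [pvGoA]
  | cons l ls ih =>
    intro fi acc
    rw [List.findIdx?_cons]
    simp only [pvGoA]
    rw [if_neg (by simp)]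
    by_cases h : pvStopP fi l
    · rw [if_pos (show PySem.Str.lstrip l ≠ "" ∧ PySem.Str.len l - PySem.Str.len (PySem.Str.lstrip l) ≤ fi
          by simpa [pvStopP] using h), if_pos h]
      simp
    · rw [if_neg (show ¬ (PySem.Str.lstrip l ≠ "" ∧ PySem.Str.len l - PySem.Str.len (PySem.Str.lstrip l) ≤ fi)
          by simpa [pvStopP] using h), ih, if_neg h]
      cases ls.findIdx? (pvStopP fi) <;> simp [List.take_succ_cons]

-- Phase 1: before the function, A skips to the first 'def ' line (if any).
theorem pvGoA_false (lines : List String) : ∀ (fi : Int) (acc : List String),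
    pvGoA lines false fi acc =
      match lines.findIdx? pvDefP with
      | none => acc
      | some i =>
          pvGoA (lines.drop (i+1)) true
            (PySem.Str.len (lines.getD i "") - PySem.Str.len (PySem.Str.lstrip (lines.getD i "")))
            (acc ++ [PySem.Str.lstrip (lines.getD i "")]) := by
  induction lines with
  | nil => intro fi acc; simp [pvGoA]
  | cons l ls ih =>
    intro fi acc
    rw [List.findIdx?_cons]
    simp only [pvGoA]
    rw [if_pos trivial]
    by_cases h : pvDefP l
    · rw [if_pos (show PySem.Str.startswith (PySem.Str.lstrip l) "def " = true by simpa [pvDefP] using h),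
          if_pos h]
      simp
    · rw [if_neg (show ¬ PySem.Str.startswith (PySem.Str.lstrip l) "def " = true by simpa [pvDefP] using h),
          ih, if_neg h]
      cases ls.findIdx? pvDefP <;> simp

-- ===== VERDICT (by name: the statement is the Claim_ definition above) =====
theorem extract_eureka_code_spec : Claim_equal_extract_eureka_code := by
  intro code_string _
  unfold Spec_extract_eureka_code extract_eureka_code extract_eureka_code_alt
  rw [pvGoA_false]
  cases hfi : ((PySem.Str.split? code_string "\n").getD []).findIdx? pvDefP with
  | none => simp only [hfi]; rfl
  | some i => simp only [hfi]; rw [pvGoA_true]; simp
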